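-- pv_equiv track=rewrite | github.com/MrBrantCode/unitest_baseline | mut_generate/mist_train_taco/taco_2523/solution.py | can_delete_column_to_make_rows_unique
-- ===== SOURCE A (Python) =====
-- def can_delete_column_to_make_rows_unique(matrix, n, m):
--     # Convert each row to an integer representation
--     row_integers = [int(''.join(row), 2) for row in matrix]
--
--     # Check if all rows are unique
--     if len(set(row_integers)) == n:
--         return "Yes"
--
--     # Try deleting each column one by one and check if rows become unique
--     for col in range(m):
--         modified_rows = []
--         for row in matrix:
--             modified_row = row[:col] + row[col+1:]
--             modified_rows.append(int(''.join(modified_row), 2))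
--
--         if len(set(modified_rows)) == n:
--             return "Yes"
--
--     return "No"
-- ===== SOURCE B (Python) =====
-- def can_delete_column_to_make_rows_unique(matrix, n, m):
--     # Deleting a column can only merge rows, never separate them, so for an
--     # n x m single-digit binary matrix the answer is simply whether the n row
--     # values are already pairwise distinct: one pass, no column-deletion loop.
--     row_integers = {int(''.join(row), 2) for row in matrix}
--     return "Yes" if len(row_integers) == n else "No"
-- ===== Notes on version B (the rewrite author's own statement) =====
-- stated objective: faster
-- what changed: B drops A's whole column-deletion search: on an n x m single-binary-digit matrix deleting a column can only merge rows, never separate them, so the answer equals the plain all-row-values-distinct test done in one pass.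
-- outside the precondition, e.g. on can_delete_column_to_make_rows_unique([['1', '00'], ['10', '0']], 2, 2): A returns 'Yes', B returns 'No'; on can_delete_column_to_make_rows_unique([['0', '0'], ['0', '1']], 1, 2): A returns 'Yes', B returns 'No'; on can_delete_column_to_make_rows_unique([['1', '0'], ['0', '1', '0']], 2, 2): A returns 'Yes', B returns 'No'
import Mathlib
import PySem

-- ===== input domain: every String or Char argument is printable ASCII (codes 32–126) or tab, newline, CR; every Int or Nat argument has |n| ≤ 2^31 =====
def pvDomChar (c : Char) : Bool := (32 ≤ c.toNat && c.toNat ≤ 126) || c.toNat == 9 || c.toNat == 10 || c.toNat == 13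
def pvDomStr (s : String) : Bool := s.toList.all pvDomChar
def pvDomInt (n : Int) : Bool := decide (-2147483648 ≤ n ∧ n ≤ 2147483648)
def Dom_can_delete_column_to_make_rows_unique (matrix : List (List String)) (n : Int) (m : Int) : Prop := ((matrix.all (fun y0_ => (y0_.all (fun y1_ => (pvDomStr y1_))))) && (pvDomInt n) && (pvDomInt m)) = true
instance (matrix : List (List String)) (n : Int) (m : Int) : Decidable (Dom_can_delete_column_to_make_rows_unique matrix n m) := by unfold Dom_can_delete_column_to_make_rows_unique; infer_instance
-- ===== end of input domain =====

-- B replaces A's column-deletion search by the plain all-row-values-distinct test (deleting a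
-- column can only merge rows of an n×m binary matrix, never separate them): O(n·m) vs O(n·m²).

-- ===== PORT A =====

-- int(''.join(row), 2): concatenate the entries' characters, then read them as a base-2 numeral.
-- Exact on Pre_'s domain, where every joined string is a nonempty string of '0'/'1' digits.
def pvBin (row : List String) : Int :=
  (row.foldl (fun acc s => acc ++ s.toList) ([] : List Char)).foldl
    (fun v c => 2 * v + (if c = '1' then (1 : Int) else 0)) 0

-- the 'for col in range(m)' loop with its early return ("Yes") and fall-through ("No")
def pvLoopA (matrix : List (List String)) (n : Int) : List Int → String
  | [] => "No"
  | col :: rest =>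
    let modified_rows := matrix.map (fun row =>
      pvBin (PySem.List.slice row none (some col) ++ PySem.List.slice row (some (col + 1)) none))
    if ((PySem.Set.ofList modified_rows).length : Int) = n then "Yes"
    else pvLoopA matrix n rest

def can_delete_column_to_make_rows_unique (matrix : List (List String)) (n : Int) (m : Int) : String :=
  let row_integers := matrix.map (fun row => pvBin row)
  if ((PySem.Set.ofList row_integers).length : Int) = n then "Yes"
  else pvLoopA matrix n (PySem.List.pyRange 0 m 1)

-- ===== PORT B =====

def can_delete_column_to_make_rows_unique_alt (matrix : List (List String)) (n : Int) (m : Int) : String :=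
  let row_integers := PySem.Set.ofList (matrix.map (fun row => pvBin row))
  if ((row_integers).length : Int) = n then "Yes" else "No"

-- ===== PRECONDITION & SPEC =====
-- Pre_ restricts to matrices of equal-length nonempty rows of single binary digits "0"/"1" with the
-- row count at most n (A also returns on other int()-parsable strings, ragged rows and smaller n,
-- where its column-deletion loop can behave differently; see the cites), and excludes nonempty
-- one-digit-row matrices that are duplicated or mislabelled (unless m ≤ 0), on which A raises
-- ValueError from int('', 2) after deleting a row's only column.
def Pre_can_delete_column_to_make_rows_unique (matrix : List (List String)) (n : Int) (m : Int) : Prop :=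
  (∀ row ∈ matrix, row ≠ [] ∧ ∀ s ∈ row, s = "0" ∨ s = "1") ∧
  (∀ r1 ∈ matrix, ∀ r2 ∈ matrix, r1.length = r2.length) ∧
  (matrix = [] ∨ (matrix.length : Int) ≤ n) ∧
  (matrix = [] ∨ (∀ row ∈ matrix, 2 ≤ row.length) ∨ m ≤ 0 ∨
    (matrix.Nodup ∧ n = (matrix.length : Int)))
instance (matrix : List (List String)) (n : Int) (m : Int) : Decidable (Pre_can_delete_column_to_make_rows_unique matrix n m) := by unfold Pre_can_delete_column_to_make_rows_unique; infer_instance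

def pvWitness_can_delete_column_to_make_rows_unique : List (List String) × Int × Int :=
  ([["0", "1"], ["1", "0"]], 2, 2)

def Spec_can_delete_column_to_make_rows_unique (matrix : List (List String)) (n : Int) (m : Int) (out : String) : Prop := out = can_delete_column_to_make_rows_unique_alt matrix n m
instance (matrix : List (List String)) (n : Int) (m : Int) (out : String) : Decidable (Spec_can_delete_column_to_make_rows_unique matrix n m out) := by unfold Spec_can_delete_column_to_make_rows_unique; infer_instance

-- ===== CLAIM (what is proved, stated in full; the proofs are below) =====
def Claim_equal_can_delete_column_to_make_rows_unique : Prop := ∀ (matrix : List (List String)) (n : Int) (m : Int), Dom_can_delete_column_to_make_rows_unique matrix n m → Pre_can_delete_column_to_make_rows_unique matrix n m → Spec_can_delete_column_to_make_rows_unique matrix n m (can_delete_column_to_make_rows_unique matrix n m)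

-- ===== LEMMAS AND PROOFS =====

-- the bit a single-digit entry contributes
def pvBit (s : String) : Int := if s = "1" then 1 else 0

-- on single-binary-digit rows, pvBin is a fold of the entries themselves
theorem pvMapChar (row : List String) (h : ∀ s ∈ row, s = "0" ∨ s = "1") :
    row.flatMap String.toList = row.map (fun s => if s = "1" then '1' else '0') := by
  induction row with
  | nil => rfl
  | cons x t ih =>
    have hx := h x (by simp)
    have ht : ∀ s ∈ t, s = "0" ∨ s = "1" := fun s hs => h s (by simp [hs])
    rcases hx with rfl | rfl <;> simp [List.flatMap_cons, ih ht, List.map_cons]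

-- on single-binary-digit rows, pvBin is a fold of the entries themselves
theorem pvBin_eq_foldl (row : List String) (h : ∀ s ∈ row, s = "0" ∨ s = "1") :
    pvBin row = row.foldl (fun v s => 2 * v + pvBit s) 0 := by
  have hjoin : row.foldl (fun acc s => acc ++ s.toList) ([] : List Char)
      = row.flatMap String.toList := by
    simpa using PySem.List.foldl_append_eq_flatMap String.toList row []
  unfold pvBin
  rw [hjoin, pvMapChar row h, List.foldl_map]
  congr 1
  funext v s
  by_cases hs : s = "1" <;> simp [hs, pvBit]

-- the fold is injective (together with the accumulator) on same-length single-digit rows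
theorem pvFold_inj : ∀ (r1 r2 : List String), (∀ s ∈ r1, s = "0" ∨ s = "1") →
    (∀ s ∈ r2, s = "0" ∨ s = "1") → r1.length = r2.length → ∀ a1 a2 : Int,
    r1.foldl (fun v s => 2 * v + pvBit s) a1 = r2.foldl (fun v s => 2 * v + pvBit s) a2 →
    a1 = a2 ∧ r1 = r2 := by
  intro r1
  induction r1 with
  | nil =>
    intro r2 _ _ hlen a1 a2 hf
    cases r2 with
    | nil => exact ⟨hf, rfl⟩
    | cons y t2 => simp at hlen
  | cons x t1 ih =>
    intro r2 h1 h2 hlen a1 a2 hf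
    cases r2 with
    | nil => simp at hlen
    | cons y t2 =>
      have ht1 : ∀ s ∈ t1, s = "0" ∨ s = "1" := fun s hs => h1 s (by simp [hs])
      have ht2 : ∀ s ∈ t2, s = "0" ∨ s = "1" := fun s hs => h2 s (by simp [hs])
      have hlen' : t1.length = t2.length := by simpa using hlen
      have hstep := ih t2 ht1 ht2 hlen' (2 * a1 + pvBit x) (2 * a2 + pvBit y) (by simpa using hf)
      have hx := h1 x (by simp)
      have hy := h2 y (by simp)
      rcases hx with rfl | rfl
      · rcases hy with rfl | rfl
        · simp [pvBit] at hstep; exact ⟨by omega, by rw [hstep.2]⟩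
        · simp [pvBit] at hstep; exact absurd hstep.1 (by omega)
      · rcases hy with rfl | rfl
        · simp [pvBit] at hstep; exact absurd hstep.1 (by omega)
        · simp [pvBit] at hstep; exact ⟨by omega, by rw [hstep.2]⟩

theorem pvBin_inj (r1 r2 : List String) (h1 : ∀ s ∈ r1, s = "0" ∨ s = "1")
    (h2 : ∀ s ∈ r2, s = "0" ∨ s = "1") (hlen : r1.length = r2.length)
    (h : pvBin r1 = pvBin r2) : r1 = r2 := by
  rw [pvBin_eq_foldl r1 h1, pvBin_eq_foldl r2 h2] at h
  exact (pvFold_inj r1 r2 h1 h2 hlen 0 0 h).2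

-- |set(l)| = |l| exactly when l has no duplicates
theorem pvOfList_len_iff (l : List Int) :
    (PySem.Set.ofList l).length = l.length ↔ l.Nodup := by
  have htf : (PySem.Set.ofList l).toFinset = l.toFinset := by
    ext x
    simp [List.mem_toFinset, PySem.Set.mem_ofList]
  have h1 : (PySem.Set.ofList l).length = l.dedup.length := by
    rw [← List.toFinset_card_of_nodup (PySem.Set.nodup_ofList l), htf, List.card_toFinset]
  rw [h1]
  constructor
  · intro hlen
    have := List.Sublist.eq_of_length (List.dedup_sublist l) hlen
    exact List.dedup_eq_self.mp this
  · intro hnd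
    rw [List.dedup_eq_self.mpr hnd]

-- any duplicated row keeps the loop answering "No" (n being the row count)
theorem pvOfList_len_le (l : List Int) : (PySem.Set.ofList l).length ≤ l.length := by
  have htf : (PySem.Set.ofList l).toFinset = l.toFinset := by
    ext x
    simp [List.mem_toFinset, PySem.Set.mem_ofList]
  have h1 : (PySem.Set.ofList l).length = l.dedup.length := by
    rw [← List.toFinset_card_of_nodup (PySem.Set.nodup_ofList l), htf, List.card_toFinset]
  rw [h1]
  exact (List.dedup_sublist l).length_le

-- once the up-front all-distinct test has failed, every iteration of the loop answers "No"
theorem pvLoopA_no (matrix : List (List String)) (n : Int)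
    (hdig : ∀ row ∈ matrix, row ≠ [] ∧ ∀ s ∈ row, s = "0" ∨ s = "1")
    (hlen : ∀ r1 ∈ matrix, ∀ r2 ∈ matrix, r1.length = r2.length)
    (hn : matrix = [] ∨ (matrix.length : Int) ≤ n)
    (hc : ¬ ((PySem.Set.ofList (matrix.map (fun row => pvBin row))).length : Int) = n) :
    ∀ cols : List Int, pvLoopA matrix n cols = "No" := by
  intro cols
  induction cols with
  | nil => rfl
  | cons col rest ih =>
    have hne : ¬ ((PySem.Set.ofList (matrix.map (fun row =>
        pvBin (PySem.List.slice row none (some col) ++ PySem.List.slice row (some (col + 1)) none)))).length : Int) = n := by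
      intro hEq
      rcases hn with rfl | hle
      · simp [PySem.Set.ofList] at hEq hc
        exact hc hEq
      · set g := fun row => pvBin (PySem.List.slice row none (some col) ++ PySem.List.slice row (some (col + 1)) none) with hg
        have h1 : (PySem.Set.ofList (matrix.map g)).length ≤ (matrix.map g).length :=
          pvOfList_len_le _
        have h2 : (matrix.map g).length = matrix.length := List.length_map ..
        -- |set(modified)| = n together with |set(modified)| ≤ rows ≤ n forces n = rows
        have hnlen : n = (matrix.length : Int) := by omega
        have hmodnodup : (matrix.map g).Nodup := by
          apply (pvOfList_len_iff _).mp
          omega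
        -- the up-front test failed with n = rows, so two rows share a value, hence are equal
        have hnodup : ¬ matrix.Nodup := by
          intro hnd
          apply hc
          have hinj : ∀ r1 ∈ matrix, ∀ r2 ∈ matrix, pvBin r1 = pvBin r2 → r1 = r2 := by
            intro r1 hr1 r2 hr2 hEq'
            exact pvBin_inj r1 r2 (hdig r1 hr1).2 (hdig r2 hr2).2 (hlen r1 hr1 r2 hr2) hEq'
          rw [(pvOfList_len_iff _).mpr (hnd.map_on hinj)]
          simp [hnlen]
        obtain ⟨x, hdup⟩ := List.exists_duplicate_iff_not_nodup.mpr hnodup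
        have hsub : [x, x].Sublist matrix := List.duplicate_iff_sublist.mp hdup
        exact (List.duplicate_iff_sublist.mpr
          (by simpa using List.Sublist.map g hsub)).not_nodup hmodnodup
    simp only [pvLoopA, hne, if_false]
    exact ih

-- ===== VERDICT (by name: the statement is the Claim_ definition above) =====
theorem can_delete_column_to_make_rows_unique_spec : Claim_equal_can_delete_column_to_make_rows_unique := by
  intro matrix n m _hdom hpre
  obtain ⟨hdig, hlen, hn, _⟩ := hpre
  unfold Spec_can_delete_column_to_make_rows_unique
  unfold can_delete_column_to_make_rows_unique can_delete_column_to_make_rows_unique_alt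
  by_cases hc : ((PySem.Set.ofList (matrix.map (fun row => pvBin row))).length : Int) = n
  · simp [hc]
  · simp only [hc, if_false]
    exact pvLoopA_no matrix n hdig hlen hn hc _
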